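-- pv_equiv track=rewrite | github.com/dwavesystems/penaltymodel | penaltymodel/generation.py | next_auxiliary
-- ===== SOURCE A (Python) =====
-- from typing import Dict, Iterable, List, Mapping, Optional, Sequence, Tuple
--
-- def next_auxiliary(state: Tuple[int, ...]) -> Tuple[int, ...]:
--     s = list(state)
--     for i in range(len(s)-1, -1, -1):
--         if s[i] <= 0:
--             s[i] = 1
--             break
--         else:
--             s[i] = -1
--     return tuple(s)
-- ===== SOURCE B (Python) =====
-- def next_auxiliary(state):
--     # Count the values <= 0 once, then one forward pass: while the counter of
--     # remaining <= 0 values in the (strict) tail is positive the element is kept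
--     # verbatim; the element that exhausts the counter is the pivot (1 if <= 0,
--     # else there was no <= 0 value at all and everything from here is -1).
--     n = len(state)
--     remaining = sum(1 for e in state if e <= 0)
--     out = []
--     for head in state:
--         if head <= 0:
--             remaining -= 1
--         if remaining > 0:
--             out.append(head)
--         else:
--             out.append(1 if head <= 0 else -1)
--             out.extend([-1] * (n - len(out)))
--             break
--     return tuple(out)
-- ===== Notes on version B (the rewrite author's own statement) =====
-- stated objective: alternative
-- what changed: Replaces A's right-to-left in-place ripple with break by a counting pass (number of values <= 0) followed by a single left-to-right pass driven by a decrementing counter that locates the pivot without ever scanning backwards.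
import Mathlib
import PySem

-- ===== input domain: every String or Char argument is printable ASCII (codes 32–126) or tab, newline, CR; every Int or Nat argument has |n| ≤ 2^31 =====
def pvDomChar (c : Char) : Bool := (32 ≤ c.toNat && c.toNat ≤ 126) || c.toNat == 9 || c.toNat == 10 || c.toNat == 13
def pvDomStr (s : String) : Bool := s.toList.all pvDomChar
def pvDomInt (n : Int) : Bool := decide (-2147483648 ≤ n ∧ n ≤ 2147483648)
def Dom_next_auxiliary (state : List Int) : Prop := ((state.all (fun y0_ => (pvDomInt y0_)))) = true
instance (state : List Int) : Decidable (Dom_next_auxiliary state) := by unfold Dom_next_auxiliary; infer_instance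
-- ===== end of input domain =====

-- B replaces A's right-to-left in-place ripple with break by a count of the <= 0 values
-- plus one left-to-right pass with a decrementing counter; alternative algorithm, not faster.


-- ===== PORT A =====
-- A iterates i = len-1 … 0, setting s[i] := -1 until it finds s[i] <= 0, sets it to 1 and breaks.
-- Ported as structural recursion on the reversed list (the descending index loop with break).
def pvRippleRev : List Int → List Int
  | [] => []
  | x :: rest => if x ≤ 0 then 1 :: rest else (-1) :: pvRippleRev rest

def next_auxiliary (state : List Int) : List Int :=
  (pvRippleRev state.reverse).reverse

-- ===== PORT B =====
-- B: count the values <= 0 once, then one forward pass carrying the counter of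
-- <= 0 values remaining in the strict tail; the element exhausting it is the pivot.
def pvForward : List Int → Nat → List Int
  | [], _ => []
  | head :: rest, remaining =>
    let remaining' := if head ≤ 0 then remaining - 1 else remaining
    if remaining' > 0 then head :: pvForward rest remaining'
    else (if head ≤ 0 then 1 else -1) :: List.replicate rest.length (-1)

def next_auxiliary_alt (state : List Int) : List Int :=
  pvForward state (state.countP (fun e => decide (e ≤ 0)))

-- ===== PRECONDITION & SPEC =====
def Spec_next_auxiliary (state : List Int) (out : List Int) : Prop := out = next_auxiliary_alt state
instance (state : List Int) (out : List Int) : Decidable (Spec_next_auxiliary state out) := by unfold Spec_next_auxiliary; infer_instance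

-- ===== CLAIM (what is proved, stated in full; the proofs are below) =====
def Claim_equal_next_auxiliary : Prop := ∀ (state : List Int), Dom_next_auxiliary state → Spec_next_auxiliary state (next_auxiliary state)

-- ===== LEMMAS AND PROOFS =====

-- if the prefix is all positive, the ripple turns it into -1s and continues
theorem pv_ripple_pos (r l : List Int) (h : ∀ e ∈ r, ¬ e ≤ 0) :
    pvRippleRev (r ++ l) = List.replicate r.length (-1) ++ pvRippleRev l := by
  induction r with
  | nil => simp
  | cons a t ih =>
    have ha := h a (by simp)
    simp only [List.cons_append, pvRippleRev, if_neg ha, List.length_cons,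
      List.replicate_succ, List.cons_append]
    rw [ih (fun e he => h e (by simp [he]))]

-- if the prefix contains a value <= 0, the ripple stops inside it
theorem pv_ripple_stop (r l : List Int) (h : ∃ e ∈ r, e ≤ 0) :
    pvRippleRev (r ++ l) = pvRippleRev r ++ l := by
  induction r with
  | nil => simp at h
  | cons a t ih =>
    by_cases ha : a ≤ 0
    · simp [pvRippleRev, ha]
    · obtain ⟨e, he, hle⟩ := h
      have het : e ∈ t := by
        rcases List.mem_cons.mp he with rfl | h' 
        · exact absurd hle ha
        · exact h'
      simp only [List.cons_append, pvRippleRev, if_neg ha]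
      rw [ih ⟨e, het, hle⟩]

-- ===== VERDICT (by name: the statement is the Claim_ definition above) =====
theorem pv_main (state : List Int) : next_auxiliary state = next_auxiliary_alt state := by
  induction state with
  | nil => rfl
  | cons x t ih =>
    unfold next_auxiliary next_auxiliary_alt at *
    have hcount : (x :: t).countP (fun e => decide (e ≤ 0))
        = (if x ≤ 0 then t.countP (fun e => decide (e ≤ 0)) + 1
           else t.countP (fun e => decide (e ≤ 0))) := by
      by_cases hx : x ≤ 0 <;> simp [hx]
    by_cases ht : 0 < t.countP (fun e => decide (e ≤ 0))
    · -- the tail still contains a value <= 0: head kept, recurse / ripple stops in the tail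
      have hex : ∃ e ∈ t.reverse, e ≤ 0 := by
        obtain ⟨e, he, hle⟩ := List.countP_pos_iff.mp ht
        exact ⟨e, List.mem_reverse.mpr he, by simpa using hle⟩
      simp only [List.reverse_cons]
      rw [pv_ripple_stop t.reverse [x] hex]
      simp only [List.reverse_append, List.reverse_singleton, List.singleton_append]
      rw [ih]
      rw [hcount]
      by_cases hx : x ≤ 0 <;> simp [pvForward, hx, ht]
    · -- tail all positive: head is the pivot; the ripple turns the tail into -1s
      have hz : t.countP (fun e => decide (e ≤ 0)) = 0 := by omega
      have hall : ∀ e ∈ t.reverse, ¬ e ≤ 0 := by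
        intro e he
        have := List.countP_eq_zero.mp hz e (List.mem_reverse.mp he)
        simpa using this
      simp only [List.reverse_cons]
      rw [pv_ripple_pos t.reverse [x] hall]
      simp only [pvRippleRev]
      rw [hcount]
      by_cases hx : x ≤ 0 <;> simp [pvForward, hx, hz]

theorem next_auxiliary_spec : Claim_equal_next_auxiliary :=
  fun state _ => pv_main state
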